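-- pv_equiv track=rewrite | github.com/josemvelazquezf-N0v/Image-Live-nonLive-Reader | LectorDeImagenes.py | combinar_textos
-- ===== SOURCE A (Python) =====
-- from collections import Counter
--
-- def combinar_textos(lista_textos):
--     textos = [t.strip() for t in lista_textos if t and t.strip()]
--     if not textos:
--         return ""
--
--     conteo = Counter(textos)
--     texto_mas_comun, freq = conteo.most_common(1)[0]
--     if freq >= 2 or len(textos) == 1:
--         return texto_mas_comun
--
--     listas_palabras = [t.split() for t in textos]
--     max_len = max(len(lp) for lp in listas_palabras)
--     resultado = []
--
--     for i in range(max_len):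
--         palabras_pos = [lp[i] for lp in listas_palabras if i < len(lp)]
--         if not palabras_pos:
--             continue
--         palabra = Counter(palabras_pos).most_common(1)[0][0]
--         resultado.append(palabra)
--
--     return " ".join(resultado)
-- ===== SOURCE B (Python) =====
-- from collections import Counter
--
-- def combinar_textos(lista_textos):
--     textos = [t.strip() for t in lista_textos if t and t.strip()]
--     if not textos:
--         return ""
--
--     conteo = Counter(textos)
--     texto_mas_comun, freq = conteo.most_common(1)[0]
--     if freq >= 2 or len(textos) == 1:
--         return texto_mas_comun
--
--     # Single pass: build one Counter per word position, list by list.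
--     counters = []
--     for t in textos:
--         for i, w in enumerate(t.split()):
--             if i == len(counters):
--                 counters.append(Counter())
--             counters[i][w] += 1
--
--     return " ".join(c.most_common(1)[0][0] for c in counters)
-- ===== Notes on version B (the rewrite author's own statement) =====
-- stated objective: alternative
-- what changed: The per-position vote no longer rescans every word list for each position: one pass over the word lists builds a table of per-position Counters (fed list-by-list to keep the tie-breaking insertion order), then the winners are read off position by position.
import Mathlib
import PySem

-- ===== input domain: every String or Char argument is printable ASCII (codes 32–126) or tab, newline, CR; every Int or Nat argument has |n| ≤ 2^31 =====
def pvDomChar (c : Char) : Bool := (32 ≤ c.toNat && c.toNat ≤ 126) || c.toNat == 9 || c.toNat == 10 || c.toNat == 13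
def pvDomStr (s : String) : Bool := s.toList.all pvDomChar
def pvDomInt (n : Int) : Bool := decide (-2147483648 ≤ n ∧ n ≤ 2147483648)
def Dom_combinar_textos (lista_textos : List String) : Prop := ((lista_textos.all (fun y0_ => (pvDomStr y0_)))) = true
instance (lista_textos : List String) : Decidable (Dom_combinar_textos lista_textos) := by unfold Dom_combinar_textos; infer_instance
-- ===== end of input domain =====

-- B replaces the position-outer loop that rescans every word list per position with a single
-- pass building a table of per-position counters (objective: alternative decomposition, same result).

-- ===== PORT A =====

-- Counter(xs).most_common(1)[0]: the first item (in insertion order) with maximal count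
-- (heapq.nlargest(1)/max keep the FIRST maximal element, hence the strict '>').
def pvMostCommon1 (items : List (String × Int)) : String × Int :=
  match items with
  | [] => ("", 0)   -- unreachable: only applied to counters of nonempty lists
  | p :: rest => rest.foldl (fun acc q => if q.2 > acc.2 then q else acc) p

def combinar_textos (lista_textos : List String) : String :=
  let textos := (lista_textos.filter
      (fun t => !(t == "") && !(PySem.Str.strip t == ""))).map PySem.Str.strip
  if textos = [] then "" else
  let conteo := PySem.Dict.counter textos
  let tf := pvMostCommon1 conteo.items
  if tf.2 ≥ 2 ∨ textos.length = 1 then tf.1 else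
  let listas_palabras := textos.map PySem.Str.split₀
  let max_len := PySem.List.maxD (listas_palabras.map List.length) (fun n => n) 0
  let resultado := (PySem.List.pyRange 0 (max_len : Int)).foldl (fun res i =>
      let palabras_pos := listas_palabras.filterMap
        (fun lp => if i < (lp.length : Int) then PySem.List.pyGet? lp i else none)
      if palabras_pos = [] then res
      else res ++ [(pvMostCommon1 (PySem.Dict.counter palabras_pos).items).1]) []
  PySem.Str.join " " resultado

-- ===== PORT B =====

-- the inner 'for i, w in enumerate(t.split()): if i == len(counters): append Counter(); counters[i][w] += 1'
-- (enumerate indices are ≥ 0, so '.toNat' is exact here)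
def pvFeed (cs : List (PySem.Dict String Int)) (ws : List String) : List (PySem.Dict String Int) :=
  (PySem.List.enumerate ws).foldl (fun cs p =>
    let cs2 := if p.1 == (cs.length : Int) then cs ++ [(PySem.Dict.empty : PySem.Dict String Int)] else cs
    cs2.modify p.1.toNat (fun c => c.modify p.2 0 (· + 1))) cs

def combinar_textos_alt (lista_textos : List String) : String :=
  let textos := (lista_textos.filter
      (fun t => !(t == "") && !(PySem.Str.strip t == ""))).map PySem.Str.strip
  if textos = [] then "" else
  let conteo := PySem.Dict.counter textos
  let tf := pvMostCommon1 conteo.items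
  if tf.2 ≥ 2 ∨ textos.length = 1 then tf.1 else
  let counters := textos.foldl (fun cs t => pvFeed cs (PySem.Str.split₀ t)) []
  PySem.Str.join " " (counters.map (fun c => (pvMostCommon1 c.items).1))

-- ===== PRECONDITION & SPEC =====
def Spec_combinar_textos (lista_textos : List String) (out : String) : Prop := out = combinar_textos_alt lista_textos
instance (lista_textos : List String) (out : String) : Decidable (Spec_combinar_textos lista_textos out) := by unfold Spec_combinar_textos; infer_instance

-- ===== CLAIM (what is proved, stated in full; the proofs are below) =====
def Claim_equal_combinar_textos : Prop := ∀ (lista_textos : List String), Dom_combinar_textos lista_textos → Spec_combinar_textos lista_textos (combinar_textos lista_textos)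

-- ===== LEMMAS AND PROOFS =====

-- the words at position i, taken from the word lists in order (A's 'palabras_pos')
def pvCol (W : List (List String)) (i : Nat) : List String := W.filterMap (fun lp => lp[i]?)

-- the maximal word-list length
def pvMaxLen (W : List (List String)) : Nat := (W.map List.length).foldl max 0

theorem pvMaxLen_append (W : List (List String)) (ws : List String) :
    pvMaxLen (W ++ [ws]) = max (pvMaxLen W) ws.length := by
  simp [pvMaxLen]

theorem pvCol_append (W : List (List String)) (ws : List String) (i : Nat) :
    pvCol (W ++ [ws]) i = pvCol W i ++ (ws[i]?).toList := by
  cases h : ws[i]? <;>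
    simp [pvCol, List.filterMap_append, h]

-- one list of words fed into the counter table = one step of B's outer loop
theorem pvFeed_append (cs : List (PySem.Dict String Int)) (ws : List String) (w : String) :
    pvFeed cs (ws ++ [w]) =
      (if ((0:Int) + (ws.length : Int)) == ((pvFeed cs ws).length : Int)
        then pvFeed cs ws ++ [(PySem.Dict.empty : PySem.Dict String Int)]
        else pvFeed cs ws).modify ((0:Int) + (ws.length : Int)).toNat
          (fun c => c.modify w 0 (· + 1)) := by
  conv_lhs => rw [pvFeed, PySem.List.enumerate_append, List.foldl_append,
    PySem.List.enumerate_cons, PySem.List.enumerate_nil, List.foldl_cons, List.foldl_nil]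
  rfl

theorem pvFeed_length (ws : List String) (cs : List (PySem.Dict String Int)) :
    (pvFeed cs ws).length = max cs.length ws.length := by
  induction ws using List.reverseRecOn generalizing cs with
  | nil => simp [pvFeed, PySem.List.enumerate_nil]
  | append_singleton ws w ih =>
    rw [pvFeed_append, List.length_modify]
    split
    · rename_i hc
      simp only [beq_iff_eq] at hc
      rw [ih] at hc
      simp only [List.length_append, List.length_singleton, ih]
      omega
    · rename_i hc
      simp only [beq_iff_eq] at hc
      rw [ih] at hc
      rw [ih]
      simp only [List.length_append, List.length_singleton]
      omega

theorem pvMapId {α : Type} (o : Option α) : (fun a => a) <$> o = o := by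
  cases o <;> rfl

theorem pvFeed_get_ge (ws : List String) (cs : List (PySem.Dict String Int)) (i : Nat)
    (h : ws.length ≤ i) : (pvFeed cs ws)[i]? = cs[i]? := by
  induction ws using List.reverseRecOn generalizing cs with
  | nil => simp [pvFeed, PySem.List.enumerate_nil]
  | append_singleton ws w ih =>
    simp only [List.length_append, List.length_singleton] at h
    have hih := ih cs (by omega)
    have hlen := pvFeed_length ws cs
    have hne : ((0:Int) + (ws.length:Int)).toNat ≠ i := by omega
    rw [pvFeed_append, List.getElem?_modify]
    simp only [if_neg hne, pvMapId]
    split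
    · rename_i hc
      simp only [beq_iff_eq] at hc
      have hpl : (pvFeed cs ws).length = ws.length := by omega
      have h2 : cs[i]? = none := by
        rw [← hih]; exact List.getElem?_eq_none (by omega)
      rw [h2, List.getElem?_append_right (by omega),
        List.getElem?_eq_none (show ([(PySem.Dict.empty : PySem.Dict String Int)]).length ≤ i - (pvFeed cs ws).length by simp only [List.length_singleton]; omega)]
    · exact hih

theorem pvFeed_get_lt (ws : List String) (cs : List (PySem.Dict String Int)) (i : Nat)
    (h : i < ws.length) :
    (pvFeed cs ws)[i]? = some ((cs[i]?.getD PySem.Dict.empty).modify (ws[i]'h) 0 (· + 1)) := by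
  induction ws using List.reverseRecOn generalizing cs with
  | nil => simp at h
  | append_singleton ws w ih =>
    have hlen := pvFeed_length ws cs
    rw [pvFeed_append, List.getElem?_modify]
    by_cases hi : i < ws.length
    · have hne : ((0:Int) + (ws.length:Int)).toNat ≠ i := by omega
      have hih := ih cs hi
      have hget : (ws ++ [w])[i]'h = ws[i]'hi := List.getElem_append_left hi
      simp only [if_neg hne, pvMapId, hget]
      split
      · rename_i hc
        simp only [beq_iff_eq] at hc
        rw [List.getElem?_append, if_pos (show i < (pvFeed cs ws).length by omega), hih]
      · exact hih
    · have hieq : i = ws.length := by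
        simp only [List.length_append, List.length_singleton] at h; omega
      have hne0 : ((0:Int) + (ws.length:Int)).toNat = i := by omega
      have hpe := pvFeed_get_ge ws cs i (by omega)
      have hget : (ws ++ [w])[i]'h = w := by subst hieq; simp
      have hfun : (fun (a : PySem.Dict String Int) =>
          if ((0:Int) + (ws.length:Int)).toNat = i then a.modify w 0 (· + 1) else a)
          = (fun a => a.modify w 0 (· + 1)) := by
        funext a; rw [if_pos hne0]
      rw [hfun, hget]
      split
      · rename_i hc
        simp only [beq_iff_eq] at hc
        have hpl : (pvFeed cs ws).length = ws.length := by omega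
        have h2 : cs[i]? = none := by
          rw [← hpe]; exact List.getElem?_eq_none (by omega)
        rw [h2, List.getElem?_append_right (show (pvFeed cs ws).length ≤ i by omega),
          show i - (pvFeed cs ws).length = 0 by omega]
        rfl
      · rename_i hc
        simp only [beq_iff_eq] at hc
        have hgt : ws.length < (pvFeed cs ws).length := by omega
        have hsome : (pvFeed cs ws)[i]? = some ((pvFeed cs ws)[i]'(by omega)) :=
          List.getElem?_eq_getElem (by omega)
        rw [hsome, ← hpe, hsome]
        rfl

theorem pvOuter_get (W : List (List String)) (i : Nat) :
    ((W.foldl pvFeed [])[i]?).getD PySem.Dict.empty = PySem.Dict.counter (pvCol W i) := by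
  induction W using List.reverseRecOn with
  | nil => rfl
  | append_singleton W ws ih =>
    rw [List.foldl_append, List.foldl_cons, List.foldl_nil, pvCol_append]
    by_cases hi : i < ws.length
    · rw [pvFeed_get_lt ws _ i hi, List.getElem?_eq_getElem hi]
      simp [PySem.Dict.counter_append_singleton, ih]
    · rw [pvFeed_get_ge ws _ i (by omega),
        List.getElem?_eq_none (show ws.length ≤ i by omega)]
      simp [ih]

theorem pvOuter_length (W : List (List String)) :
    (W.foldl pvFeed []).length = pvMaxLen W := by
  induction W using List.reverseRecOn with
  | nil => simp [pvMaxLen]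
  | append_singleton W ws ih =>
    rw [List.foldl_append, List.foldl_cons, List.foldl_nil, pvFeed_length, pvMaxLen_append, ih]

theorem pvCol_ne_nil (W : List (List String)) (i : Nat) (h : i < pvMaxLen W) :
    pvCol W i ≠ [] := by
  induction W using List.reverseRecOn with
  | nil => simp [pvMaxLen] at h
  | append_singleton W ws ih =>
    rw [pvMaxLen_append] at h
    rw [pvCol_append]
    by_cases hi : i < ws.length
    · rw [List.getElem?_eq_getElem hi]
      simp
    · have h1 : i < pvMaxLen W := by omega
      have := ih h1
      intro hc
      rcases List.append_eq_nil_iff.mp hc with ⟨h2, _⟩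
      exact this h2

theorem pvCounters_eq (W : List (List String)) :
    W.foldl pvFeed [] = (List.range (pvMaxLen W)).map (fun i => PySem.Dict.counter (pvCol W i)) := by
  apply List.ext_getElem?
  intro i
  by_cases h : i < pvMaxLen W
  · have hlen : i < (W.foldl pvFeed []).length := by rw [pvOuter_length]; exact h
    have h2 := pvOuter_get W i
    rw [List.getElem?_eq_getElem hlen] at h2 ⊢
    simp only [Option.getD_some] at h2
    rw [List.getElem?_map, List.getElem?_range h]
    simp [h2]
  · rw [List.getElem?_eq_none (by rw [pvOuter_length]; omega),
      List.getElem?_eq_none (by simp; omega)]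

theorem pvFoldl_skip_none (g : Nat → List String) (f : Nat → String) (l : List Nat)
    (acc : List String) (h : ∀ x ∈ l, g x ≠ []) :
    l.foldl (fun res i => if g i = [] then res else res ++ [f i]) acc = acc ++ l.map f := by
  induction l generalizing acc with
  | nil => simp
  | cons x l ih =>
    have hx : g x ≠ [] := h x (by simp)
    simp only [List.foldl_cons, if_neg hx, List.map_cons]
    rw [ih _ (fun y hy => h y (by simp [hy]))]
    simp

theorem pvMaxD_eq_maxLen (W : List (List String)) :
    PySem.List.maxD (W.map List.length) (fun n => n) 0 = pvMaxLen W := by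
  unfold pvMaxLen
  cases h : W.map List.length with
  | nil => rw [PySem.List.maxD_nil]; rfl
  | cons x t => rw [PySem.List.maxD_id_cons, List.foldl_cons, Nat.zero_max]

-- ===== VERDICT (by name: the statement is the Claim_ definition above) =====
theorem combinar_textos_spec : Claim_equal_combinar_textos := by
  intro lista_textos _
  unfold Spec_combinar_textos combinar_textos combinar_textos_alt
  simp only []
  by_cases h1 : (lista_textos.filter (fun t => !(t == "") && !(PySem.Str.strip t == ""))).map PySem.Str.strip = []
  · simp [h1]
  · rw [if_neg h1, if_neg h1]
    set textos := (lista_textos.filter (fun t => !(t == "") && !(PySem.Str.strip t == ""))).map PySem.Str.strip with htex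
    by_cases h2 : (pvMostCommon1 (PySem.Dict.counter textos).items).2 ≥ 2 ∨ textos.length = 1
    · rw [if_pos h2, if_pos h2]
    · rw [if_neg h2, if_neg h2]
      set W := textos.map PySem.Str.split₀ with hW
      congr 1
      have hB : List.foldl (fun cs t => pvFeed cs (PySem.Str.split₀ t)) [] textos
          = W.foldl pvFeed [] := by
        rw [hW]; exact (List.foldl_map).symm
      rw [hB, pvCounters_eq W, pvMaxD_eq_maxLen,
        PySem.List.pyRange_zero_natCast, List.foldl_map]
      have hcol : ∀ k : Nat, W.filterMap
          (fun lp => if (k : Int) < (lp.length : Int) then PySem.List.pyGet? lp (k : Int) else none) = pvCol W k := by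
        intro k
        apply List.filterMap_congr
        intro lp _
        by_cases hk : k < lp.length
        · rw [if_pos (by exact_mod_cast hk), PySem.List.pyGet?_natCast]
        · rw [if_neg (by exact_mod_cast hk), eq_comm, List.getElem?_eq_none (by omega)]
      simp only [hcol]
      rw [List.map_map]
      exact pvFoldl_skip_none _ _ _ []
        (fun x hx => pvCol_ne_nil W x (by simpa using hx))
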